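-- pv_equiv track=rewrite | github.com/VesaApaja/Book_Codes | PIMC/bisection.py | bisection_indices
-- ===== SOURCE A (Python) =====
-- def bisection_indices(start, end):
--     if end - start <= 1:
--         return {}
--     mid = (start + end) // 2
--     result = {mid: (start, end)}  # midpoint and its left and right edges
--     # Recursively process left and right subranges
--     result.update(bisection_indices(start, mid))
--     result.update(bisection_indices(mid, end))
--     return result
-- ===== SOURCE B (Python) =====
-- def bisection_indices(start, end):
--     result = {}
--     stack = [(start, end)]
--     while stack:
--         s, e = stack.pop()
--         if e - s <= 1:
--             continue
--         mid = (s + e) // 2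
--         result[mid] = (s, e)
--         stack.append((mid, e))
--         stack.append((s, mid))
--     return result
-- ===== Notes on version B (the rewrite author's own statement) =====
-- stated objective: faster
-- what changed: Replaces the recursion (whose dict.update re-copies every sub-result entry at each level) by an iterative explicit-stack loop that inserts each midpoint once into a single result dict, pushing the right subrange before the left to keep the pre-order insertion order.
import Mathlib
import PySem

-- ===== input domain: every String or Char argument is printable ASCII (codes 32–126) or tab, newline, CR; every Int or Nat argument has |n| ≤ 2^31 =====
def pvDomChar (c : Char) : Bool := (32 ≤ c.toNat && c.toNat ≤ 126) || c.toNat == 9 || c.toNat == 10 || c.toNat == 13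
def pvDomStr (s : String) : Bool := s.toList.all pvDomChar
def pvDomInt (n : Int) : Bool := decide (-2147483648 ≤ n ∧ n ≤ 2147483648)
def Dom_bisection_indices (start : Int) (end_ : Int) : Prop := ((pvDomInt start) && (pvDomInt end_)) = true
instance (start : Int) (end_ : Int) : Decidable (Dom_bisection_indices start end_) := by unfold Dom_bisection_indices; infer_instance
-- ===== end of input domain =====

-- B replaces the recursion by an explicit-stack loop inserting midpoints into one dict
-- (right subrange pushed first so the left is processed first, matching A's insertion order).

-- midpoint of a range of length ≥ 2 lies strictly inside (used by both ports' termination)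
theorem pvMidBounds {s e : Int} (h : ¬ e - s ≤ 1) :
    s < PySem.Int.floordiv (s + e) 2 ∧ PySem.Int.floordiv (s + e) 2 < e := by
  rw [PySem.Int.floordiv_eq_ediv_of_pos (by norm_num : (0:Int) < 2)]
  omega

-- 3^a + 3^b < 3^(a+b) for a,b ≥ 1 (used by B's stack-loop termination measure)
theorem pvPow3 (a b : Nat) (ha : 1 ≤ a) (hb : 1 ≤ b) : 3 ^ a + 3 ^ b < 3 ^ (a + b) := by
  have h1 : 3 ^ a ≤ 3 ^ (a + b - 1) := Nat.pow_le_pow_right (by norm_num) (by omega)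
  have h2 : 3 ^ b ≤ 3 ^ (a + b - 1) := Nat.pow_le_pow_right (by norm_num) (by omega)
  have h3 : 3 ^ (a + b) = 3 * 3 ^ (a + b - 1) := by
    rw [← pow_succ']
    congr 1
    omega
  have h4 : 0 < 3 ^ (a + b - 1) := Nat.pow_pos (by norm_num)
  omega

-- ===== PORT A =====
-- recursive helper returning the dict A builds; the entry point returns its items list
def pvBisA (start : Int) (end_ : Int) : PySem.Dict Int (Int × Int) :=
  if h : end_ - start ≤ 1 then PySem.Dict.empty
  else
    ((PySem.Dict.ofList [(PySem.Int.floordiv (start + end_) 2, (start, end_))]).update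
        (pvBisA start (PySem.Int.floordiv (start + end_) 2)).items).update
      (pvBisA (PySem.Int.floordiv (start + end_) 2) end_).items
termination_by (end_ - start).toNat
decreasing_by
  · have := pvMidBounds h; omega
  · have := pvMidBounds h; omega

def bisection_indices (start : Int) (end_ : Int) : List (Int × Int × Int) :=
  (pvBisA start end_).items

-- ===== PORT B =====
-- the while loop: stack head = top of stack (list.pop pops the last pushed frame)
def pvBisLoop (stack : List (Int × Int)) (result : PySem.Dict Int (Int × Int)) :
    PySem.Dict Int (Int × Int) :=
  match stack with
  | [] => result
  | (s, e) :: rest =>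
    if h : e - s ≤ 1 then pvBisLoop rest result
    else
      pvBisLoop ((s, PySem.Int.floordiv (s + e) 2) :: (PySem.Int.floordiv (s + e) 2, e) :: rest)
        (result.insert (PySem.Int.floordiv (s + e) 2) (s, e))
termination_by (stack.map (fun p => 3 ^ (p.2 - p.1).toNat)).sum
decreasing_by
  · have : 0 < 3 ^ (e - s).toNat := Nat.pow_pos (by norm_num)
    simp only [List.map_cons, List.sum_cons]
    omega
  · have hm := pvMidBounds h
    have hp := pvPow3 (PySem.Int.floordiv (s + e) 2 - s).toNat (e - PySem.Int.floordiv (s + e) 2).toNat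
      (by omega) (by omega)
    have he : (PySem.Int.floordiv (s + e) 2 - s).toNat + (e - PySem.Int.floordiv (s + e) 2).toNat
        = (e - s).toNat := by omega
    rw [he] at hp
    simp only [List.map_cons, List.sum_cons]
    omega

def bisection_indices_alt (start : Int) (end_ : Int) : List (Int × Int × Int) :=
  (pvBisLoop [(start, end_)] PySem.Dict.empty).items

-- ===== PRECONDITION & SPEC =====
def Spec_bisection_indices (start : Int) (end_ : Int) (out : List (Int × Int × Int)) : Prop := out = bisection_indices_alt start end_
instance (start : Int) (end_ : Int) (out : List (Int × Int × Int)) : Decidable (Spec_bisection_indices start end_ out) := by unfold Spec_bisection_indices; infer_instance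

-- ===== CLAIM (what is proved, stated in full; the proofs are below) =====
def Claim_equal_bisection_indices : Prop := ∀ (start : Int) (end_ : Int), Dom_bisection_indices start end_ → Spec_bisection_indices start end_ (bisection_indices start end_)

-- ===== LEMMAS AND PROOFS =====

-- membership in keys after an update
theorem pvMemKeysUpdate (d : PySem.Dict Int (Int × Int)) (ps : List (Int × Int × Int)) (k : Int) :
    k ∈ (d.update ps).keys ↔ k ∈ d.keys ∨ k ∈ ps.map Prod.fst := by
  have h := PySem.Dict.keys_foldl_insert_key ps Prod.fst (fun _ p => p.2) d
  rw [show (d.update ps) = ps.foldl (fun d x => d.insert x.1 ((fun _ p => p.2) d x)) d from rfl, h,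
    PySem.Set.mem_update]

-- every key of A's dict lies strictly inside (start, end_)
theorem pvBisA_keys_bound (start end_ : Int) :
    ∀ k ∈ (pvBisA start end_).keys, start < k ∧ k < end_ := by
  induction start, end_ using pvBisA.induct with
  | case1 s e h =>
    rw [pvBisA]
    simp [h]
  | case2 s e h ih1 ih2 =>
    rw [pvBisA]
    simp only [dif_neg h]
    intro k hk
    have hmb := pvMidBounds h
    rw [pvMemKeysUpdate, pvMemKeysUpdate] at hk
    have hone : (PySem.Dict.ofList [(PySem.Int.floordiv (s + e) 2, (s, e))]).keys
        = [PySem.Int.floordiv (s + e) 2] := rfl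
    rcases hk with (hk | hk) | hk
    · rw [hone] at hk
      simp at hk
      omega
    · have := ih1 k hk
      omega
    · have := ih2 k hk
      omega

-- A's dict has nodup keys
theorem pvBisA_keys_nodup (start end_ : Int) : (pvBisA start end_).keys.Nodup := by
  rw [pvBisA]
  split
  · simp
  · exact PySem.Dict.nodup_keys_update _ _
      (PySem.Dict.nodup_keys_update _ _ (PySem.Dict.nodup_keys_ofList _))

-- update with fresh, distinct keys appends the pairs
theorem pvItems_update_fresh (d : PySem.Dict Int (Int × Int)) (ps : List (Int × Int × Int))
    (h1 : ∀ p ∈ ps, p.1 ∉ d.keys) (h2 : (ps.map Prod.fst).Nodup) :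
    (d.update ps).items = d.items ++ ps := by
  have h1' : ∀ p ∈ ps, d.contains p.1 = false := by
    intro p hp
    rw [PySem.Dict.contains_eq_decide_mem_keys]
    simpa using h1 p hp
  have h := PySem.Dict.items_foldl_insert_fresh ps Prod.fst Prod.snd d h1' h2
  simpa [PySem.Dict.update] using h

-- A's items flatten to midpoint :: left ++ right
theorem pvBisA_flatten (s e : Int) (h : ¬ e - s ≤ 1) :
    (pvBisA s e).items = (PySem.Int.floordiv (s + e) 2, (s, e)) ::
      ((pvBisA s (PySem.Int.floordiv (s + e) 2)).items ++
       (pvBisA (PySem.Int.floordiv (s + e) 2) e).items) := by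
  have hmb := pvMidBounds h
  have hbl := pvBisA_keys_bound s (PySem.Int.floordiv (s + e) 2)
  have hbr := pvBisA_keys_bound (PySem.Int.floordiv (s + e) 2) e
  have hkeysL : (pvBisA s (PySem.Int.floordiv (s + e) 2)).items.map Prod.fst
      = (pvBisA s (PySem.Int.floordiv (s + e) 2)).keys := rfl
  have hkeysR : (pvBisA (PySem.Int.floordiv (s + e) 2) e).items.map Prod.fst
      = (pvBisA (PySem.Int.floordiv (s + e) 2) e).keys := rfl
  have h1 := pvItems_update_fresh (PySem.Dict.ofList [(PySem.Int.floordiv (s + e) 2, (s, e))])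
      (pvBisA s (PySem.Int.floordiv (s + e) 2)).items
      (by
        intro p hp
        have hb := hbl p.1 (by rw [← hkeysL]; exact List.mem_map_of_mem hp)
        intro hmem
        have : p.1 = PySem.Int.floordiv (s + e) 2 := by
          have : (PySem.Dict.ofList [(PySem.Int.floordiv (s + e) 2, (s, e))]).keys
              = [PySem.Int.floordiv (s + e) 2] := rfl
          rw [this] at hmem
          simpa using hmem
        omega)
      (by rw [hkeysL]; exact pvBisA_keys_nodup _ _)
  have h2 := pvItems_update_fresh
      ((PySem.Dict.ofList [(PySem.Int.floordiv (s + e) 2, (s, e))]).update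
        (pvBisA s (PySem.Int.floordiv (s + e) 2)).items)
      (pvBisA (PySem.Int.floordiv (s + e) 2) e).items
      (by
        intro p hp
        have hb := hbr p.1 (by rw [← hkeysR]; exact List.mem_map_of_mem hp)
        intro hmem
        rw [show ((PySem.Dict.ofList [(PySem.Int.floordiv (s + e) 2, (s, e))]).update
            (pvBisA s (PySem.Int.floordiv (s + e) 2)).items).keys
            = (((PySem.Dict.ofList [(PySem.Int.floordiv (s + e) 2, (s, e))]).update
            (pvBisA s (PySem.Int.floordiv (s + e) 2)).items).items).map Prod.fst from rfl,
          h1] at hmem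
        rw [show (PySem.Dict.ofList [(PySem.Int.floordiv (s + e) 2, (s, e))]).items
            = [(PySem.Int.floordiv (s + e) 2, (s, e))] from rfl] at hmem
        simp only [List.cons_append, List.nil_append, List.map_cons, List.mem_cons] at hmem
        rcases hmem with hmem | hmem
        · omega
        · have := hbl p.1 (by rw [← hkeysL]; exact hmem)
          omega)
      (by rw [hkeysR]; exact pvBisA_keys_nodup _ _)
  rw [pvBisA]
  simp only [dif_neg h]
  rw [h2, h1]
  rfl

-- the loop processes the stack frames left to right, each contributing its recursive dict
theorem pvBisLoop_eq (stack : List (Int × Int)) (d : PySem.Dict Int (Int × Int)) :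
    pvBisLoop stack d = stack.foldl (fun d p => d.update (pvBisA p.1 p.2).items) d := by
  induction stack, d using pvBisLoop.induct with
  | case1 d => rw [pvBisLoop]; rfl
  | case2 d s e rest h ih =>
    rw [pvBisLoop]
    simp only [dif_pos h, ih, List.foldl_cons]
    have h0 : (pvBisA s e).items = [] := by rw [pvBisA]; simp only [dif_pos h]; rfl
    rw [h0]
    rfl
  | case3 d s e rest h ih =>
    rw [pvBisLoop]
    simp only [dif_neg h, ih, List.foldl_cons]
    congr 1
    rw [pvBisA_flatten s e h]
    show _ = List.foldl _ d ((PySem.Int.floordiv (s + e) 2, (s, e)) :: (_ ++ _))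
    rw [List.foldl_cons, List.foldl_append]
    rfl

-- ===== VERDICT (by name: the statement is the Claim_ definition above) =====
theorem bisection_indices_spec : Claim_equal_bisection_indices := by
  intro start end_ _
  unfold Spec_bisection_indices bisection_indices_alt bisection_indices
  rw [pvBisLoop_eq]
  simp only [List.foldl_cons, List.foldl_nil]
  rw [pvItems_update_fresh _ _ (by simp [PySem.Dict.keys, PySem.Dict.empty])
    (pvBisA_keys_nodup start end_)]
  simp [PySem.Dict.empty]
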